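-- pv_equiv track=rewrite | github.com/jaketurelli/dev_environment | examples/tic_tac_toe.py | action_transformations
-- ===== SOURCE A (Python) =====
-- def action_transformations(move, i):
--     state = [' ' for i in range(9)]
--     state[move] = '1'
--     if i == 0:
--         return ''.join(state[int(x)] for x in '630741852').index('1')  # clockwise 90 deg
--     if i == 1:
--         return ''.join(state[int(x)] for x in '876543210').index('1')  # clockwise 180 deg
--     if i == 2:
--         return ''.join(state[int(x)] for x in '258147036').index('1')  # clockwise 270 deg
--     if i == 3:
--         return ''.join(state[int(x)] for x in '210543876').index('1')  # mirror vertical axis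
--     if i == 4:
--         return ''.join(state[int(x)] for x in '678345012').index('1')  # mirror horizontal axis
--     if i == 5:
--         return ''.join(state[int(x)] for x in '036147258').index('1')  # mirror diagonal axis starting top left
--     if i == 6:
--         return ''.join(state[int(x)] for x in '852741630').index('1')  # mirror diagonal axis starting top right
-- ===== SOURCE B (Python) =====
-- TABLES = [
--     [2, 5, 8, 1, 4, 7, 0, 3, 6],  # clockwise 90 deg
--     [8, 7, 6, 5, 4, 3, 2, 1, 0],  # clockwise 180 deg
--     [6, 3, 0, 7, 4, 1, 8, 5, 2],  # clockwise 270 deg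
--     [2, 1, 0, 5, 4, 3, 8, 7, 6],  # mirror vertical axis
--     [6, 7, 8, 3, 4, 5, 0, 1, 2],  # mirror horizontal axis
--     [0, 3, 6, 1, 4, 7, 2, 5, 8],  # mirror diagonal axis starting top left
--     [8, 5, 2, 7, 4, 1, 6, 3, 0],  # mirror diagonal axis starting top right
-- ]
--
--
-- def action_transformations(move, i):
--     if 0 <= i <= 6:
--         return TABLES[i][move]
-- ===== Notes on version B (the rewrite author's own statement) =====
-- stated objective: simpler
-- what changed: Replaces A's build-a-9-cell-board / permute-join / scan-for-'1' per call by a precomputed 7x9 inverse-permutation table, so the body is a single indexed lookup; Pre_ excludes out-of-range moves (A raises IndexError) and i outside 0..6 (A returns None, not an int).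
-- outside the precondition, e.g. on action_transformations(0, 7): A returns None, B returns None; on action_transformations(9, 0): A raises IndexError, B raises IndexError
import Mathlib
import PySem

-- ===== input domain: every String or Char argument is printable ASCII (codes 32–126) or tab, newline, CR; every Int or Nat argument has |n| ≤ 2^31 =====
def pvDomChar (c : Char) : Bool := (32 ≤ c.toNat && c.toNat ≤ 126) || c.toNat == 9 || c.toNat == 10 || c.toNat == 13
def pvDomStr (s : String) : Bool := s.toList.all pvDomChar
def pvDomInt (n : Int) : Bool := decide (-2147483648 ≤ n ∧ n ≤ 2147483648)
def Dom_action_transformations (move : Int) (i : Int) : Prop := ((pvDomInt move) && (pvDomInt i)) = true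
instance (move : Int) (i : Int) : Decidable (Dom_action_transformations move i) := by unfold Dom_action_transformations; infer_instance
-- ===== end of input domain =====

-- B replaces A's build-board / permute-join / scan-for-'1' with a precomputed inverse-permutation table lookup (simpler).


-- ===== PORT A =====
-- ''.join(state[int(x)] for x in perm).index('1'), as in A; the none cases (IndexError /
-- ValueError / i outside 0..6, where Python A raises or returns None) are excluded by Pre_.
def pvPermIndex (state : List Char) (perm : String) : Int :=
  match PySem.List.index?
      (perm.toList.map
        (fun x => PySem.List.pyGetD state ((PySem.Int.ofStr? (String.mk [x])).getD 0) ' '))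
      '1' with
  | some k => (k : Int)
  | none => 0

def action_transformations (move : Int) (i : Int) : Int :=
  let state : List Char := (PySem.List.pyRange 0 9 1).map (fun _ => ' ')
  let state := PySem.List.pySetD state move '1'
  if i = 0 then pvPermIndex state "630741852"
  else if i = 1 then pvPermIndex state "876543210"
  else if i = 2 then pvPermIndex state "258147036"
  else if i = 3 then pvPermIndex state "210543876"
  else if i = 4 then pvPermIndex state "678345012"
  else if i = 5 then pvPermIndex state "036147258"
  else if i = 6 then pvPermIndex state "852741630"
  else 0  -- Python returns None here; excluded by Pre_

-- ===== PORT B =====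
def pvTABLES : List (List Int) :=
  [[2, 5, 8, 1, 4, 7, 0, 3, 6],
   [8, 7, 6, 5, 4, 3, 2, 1, 0],
   [6, 3, 0, 7, 4, 1, 8, 5, 2],
   [2, 1, 0, 5, 4, 3, 8, 7, 6],
   [6, 7, 8, 3, 4, 5, 0, 1, 2],
   [0, 3, 6, 1, 4, 7, 2, 5, 8],
   [8, 5, 2, 7, 4, 1, 6, 3, 0]]

def action_transformations_alt (move : Int) (i : Int) : Int :=
  if 0 ≤ i ∧ i ≤ 6 then
    PySem.List.pyGetD (PySem.List.pyGetD pvTABLES i []) move 0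
  else 0  -- Python B returns None here; excluded by Pre_

-- ===== PRECONDITION & SPEC =====
-- Pre_ excludes moves outside [-9, 8] (A raises IndexError at state[move]) and i outside
-- 0..6 (A falls off the end and returns None, which is not an int).
def Pre_action_transformations (move : Int) (i : Int) : Prop :=
  (-9 ≤ move ∧ move < 9) ∧ (0 ≤ i ∧ i ≤ 6)
instance (move : Int) (i : Int) : Decidable (Pre_action_transformations move i) := by
  unfold Pre_action_transformations; infer_instance

def pvWitness_action_transformations : Int × Int := (4, 2)

def Spec_action_transformations (move : Int) (i : Int) (out : Int) : Prop := out = action_transformations_alt move i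
instance (move : Int) (i : Int) (out : Int) : Decidable (Spec_action_transformations move i out) := by unfold Spec_action_transformations; infer_instance

-- ===== CLAIM (what is proved, stated in full; the proofs are below) =====
def Claim_equal_action_transformations : Prop := ∀ (move : Int) (i : Int), Dom_action_transformations move i → Pre_action_transformations move i → Spec_action_transformations move i (action_transformations move i)

-- ===== LEMMAS AND PROOFS =====

-- ===== VERDICT (by name: the statement is the Claim_ definition above) =====
theorem action_transformations_spec : Claim_equal_action_transformations := by
  intro move i _ hpre
  obtain ⟨⟨hm1, hm2⟩, hi1, hi2⟩ := hpre
  unfold Spec_action_transformations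
  interval_cases move <;> interval_cases i <;> decide
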